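-- pv_equiv track=rewrite | github.com/egrinstein/laser | data/mixing/waveform_mixer.py | get_noise_track_idxs
-- ===== SOURCE A (Python) =====
-- from typing import List
--
-- def get_noise_track_idxs(texts: List[str], n_target, mix_num: int):
--     """
--     Get noise tracks to mix with the target track.
--     This method guarantees that the noise tracks have different classes from the target track.
--
--     The first candidate noise track is the succeeding track of n_target in the batch.
--     If the class of the succeeding track is the same as the target track, the next track is selected.
--     This process is repeated until a noise track with a different class is found.
--     """
--
--     n_available_tracks = len(texts)
--
--     n_tracks_added = 1
--     n_track_to_add = (n_target + 1) % n_available_tracks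
--     mixed_texts_n = []
--     track_ids_to_add = []
--
--     # Find track ids to add in the batch
--     while n_tracks_added < mix_num:
--         if texts is not None:
--             # Make sure the track text (i.e., class) being added
--             # is different from the class of the target track
--             if texts[n_target] == texts[n_track_to_add]:
--                 n_track_to_add = (n_track_to_add + 1) % n_available_tracks
--                 if n_track_to_add == n_target:
--                     # If all the tracks have the same class, raise an exception (to avoid infinite loop)
--                     raise ValueError("All the tracks in the batch have the same class.")
--                 continue
--
--             mixed_texts_n.append(texts[n_track_to_add])
--
--         track_ids_to_add.append(n_track_to_add)
--         n_tracks_added += 1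
--
--     return track_ids_to_add
-- ===== SOURCE B (Python) =====
-- from typing import List
--
-- def get_noise_track_idxs(texts: List[str], n_target, mix_num: int):
--     """Find the first track after n_target (circularly) whose class differs,
--     then replicate its index mix_num-1 times."""
--     n = len(texts)
--     idx = (n_target + 1) % n
--     if mix_num <= 1:
--         return []
--     target = texts[n_target]
--     while texts[idx] == target:
--         idx = (idx + 1) % n
--         if idx == n_target:
--             raise ValueError("All the tracks in the batch have the same class.")
--     return [idx] * (mix_num - 1)
-- ===== Notes on version B (the rewrite author's own statement) =====
-- stated objective: simpler
-- what changed: Replaces A's fused advance-and-collect while loop (which re-tests the already-found index mix_num-1 times and appends one element per iteration) with a find-first circular scan followed by direct list replication [idx]*(mix_num-1).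
import Mathlib
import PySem

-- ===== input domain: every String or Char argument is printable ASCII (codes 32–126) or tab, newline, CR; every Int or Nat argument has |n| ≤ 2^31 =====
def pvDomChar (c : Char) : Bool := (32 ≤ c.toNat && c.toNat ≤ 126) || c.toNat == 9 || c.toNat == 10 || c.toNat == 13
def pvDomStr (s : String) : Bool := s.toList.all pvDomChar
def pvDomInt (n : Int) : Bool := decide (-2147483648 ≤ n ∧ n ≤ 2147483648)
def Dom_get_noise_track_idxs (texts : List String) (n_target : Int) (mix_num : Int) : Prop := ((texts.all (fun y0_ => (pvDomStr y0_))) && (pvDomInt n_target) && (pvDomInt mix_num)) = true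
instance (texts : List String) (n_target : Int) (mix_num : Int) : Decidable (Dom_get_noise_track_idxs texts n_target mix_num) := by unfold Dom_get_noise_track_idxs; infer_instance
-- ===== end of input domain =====

-- B replaces A's fused advance-and-collect loop by a find-first circular scan followed by
-- list replication; objective: simpler. Pre_ excludes only inputs where A raises or diverges.


-- ===== PORT A =====
-- A's while loop; fuel is a totality guard only (under Pre_ the loop stops well within it).
-- On paths where Python raises (texts[n_target] IndexError; wrap = ValueError) the port
-- returns the accumulator; those inputs are outside Pre_.
def aLoop (texts : List String) (n_target : Int) (mix_num : Int) (n : Int)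
    (fuel : Nat) (idx : Int) (added : Int) (mixed : List String) (acc : List Int) : List Int :=
  match fuel with
  | 0 => acc
  | Nat.succ f =>
    if added < mix_num then
      match PySem.List.pyGet? texts n_target, PySem.List.pyGet? texts idx with
      | some a, some b =>
        if a = b then
          let idx' := PySem.Int.mod (idx + 1) n
          if idx' = n_target then acc   -- ValueError (outside Pre_)
          else aLoop texts n_target mix_num n f idx' added mixed acc
        else aLoop texts n_target mix_num n f idx (added + 1) (mixed ++ [b]) (acc ++ [idx])
      | _, _ => acc   -- IndexError (outside Pre_)
    else acc

def get_noise_track_idxs (texts : List String) (n_target : Int) (mix_num : Int) : List Int :=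
  let n : Int := texts.length
  if n = 0 then []   -- ZeroDivisionError (outside Pre_)
  else
    let idx0 := PySem.Int.mod (n_target + 1) n
    aLoop texts n_target mix_num n (texts.length + mix_num.toNat + 2) idx0 1 [] []

-- ===== PORT B =====
-- B's find-first scan; fuel is a totality guard only.
def bFind (texts : List String) (target : String) (n_target : Int) (n : Int)
    (fuel : Nat) (idx : Int) : Option Int :=
  match fuel with
  | 0 => none
  | Nat.succ f =>
    match PySem.List.pyGet? texts idx with
    | none => none
    | some b =>
      if b = target then
        let idx' := PySem.Int.mod (idx + 1) n
        if idx' = n_target then none   -- ValueError (outside Pre_)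
        else bFind texts target n_target n f idx'
      else some idx

def get_noise_track_idxs_alt (texts : List String) (n_target : Int) (mix_num : Int) : List Int :=
  let n : Int := texts.length
  if n = 0 then []   -- ZeroDivisionError (outside Pre_)
  else
    let idx0 := PySem.Int.mod (n_target + 1) n
    if mix_num ≤ 1 then []
    else
      match PySem.List.pyGet? texts n_target with
      | none => []   -- IndexError (outside Pre_)
      | some target =>
        match bFind texts target n_target n (texts.length + 2) idx0 with
        | some j => List.replicate (mix_num - 1).toNat j
        | none => []   -- ValueError (outside Pre_)

-- ===== PRECONDITION & SPEC =====
-- Pre_ excludes exactly the inputs on which Python A does not return: empty texts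
-- (ZeroDivisionError), and — only when mix_num > 1 — an out-of-range n_target (IndexError)
-- or a batch in which every text equals texts[n_target] (ValueError, or an infinite loop
-- when n_target is negative).
def Pre_get_noise_track_idxs (texts : List String) (n_target : Int) (mix_num : Int) : Prop :=
  texts ≠ [] ∧
  (mix_num ≤ 1 ∨
    (-(texts.length : Int) ≤ n_target ∧ n_target < (texts.length : Int) ∧
      ∃ t ∈ texts, t ≠ PySem.List.pyGetD texts n_target ""))
instance (texts : List String) (n_target : Int) (mix_num : Int) : Decidable (Pre_get_noise_track_idxs texts n_target mix_num) := by unfold Pre_get_noise_track_idxs; infer_instance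

def pvWitness_get_noise_track_idxs : List String × Int × Int := (["cat", "dog", "cat"], 0, 3)

def Spec_get_noise_track_idxs (texts : List String) (n_target : Int) (mix_num : Int) (out : List Int) : Prop := out = get_noise_track_idxs_alt texts n_target mix_num
instance (texts : List String) (n_target : Int) (mix_num : Int) (out : List Int) : Decidable (Spec_get_noise_track_idxs texts n_target mix_num out) := by unfold Spec_get_noise_track_idxs; infer_instance

-- ===== CLAIM (what is proved, stated in full; the proofs are below) =====
def Claim_equal_get_noise_track_idxs : Prop := ∀ (texts : List String) (n_target : Int) (mix_num : Int), Dom_get_noise_track_idxs texts n_target mix_num → Pre_get_noise_track_idxs texts n_target mix_num → Spec_get_noise_track_idxs texts n_target mix_num (get_noise_track_idxs texts n_target mix_num)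

-- ===== LEMMAS AND PROOFS =====

-- Once a differing index is reached, A's loop appends that same index until mix_num is hit.
lemma aLoop_collect (texts : List String) (n_target : Int) (mix_num : Int) (n : Int)
    (a b : String) (idx : Int)
    (ha : PySem.List.pyGet? texts n_target = some a)
    (hb : PySem.List.pyGet? texts idx = some b) (hab : a ≠ b) :
    ∀ (fuel : Nat) (added : Int) (mixed : List String) (acc : List Int),
      (mix_num - added).toNat ≤ fuel →
      aLoop texts n_target mix_num n fuel idx added mixed acc
        = acc ++ List.replicate (mix_num - added).toNat idx := by
  intro fuel
  induction fuel with
  | zero =>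
    intro added mixed acc h
    have : (mix_num - added).toNat = 0 := Nat.le_zero.mp h
    simp [aLoop, this]
  | succ f ih =>
    intro added mixed acc h
    by_cases hlt : added < mix_num
    · have h1 : (mix_num - added).toNat = (mix_num - (added + 1)).toNat + 1 := by omega
      rw [aLoop]
      simp only [hlt, if_pos, ha, hb]
      rw [if_neg hab, ih (added + 1) (mixed ++ [b]) (acc ++ [idx]) (by omega), h1]
      simp [List.replicate_succ]
    · have h0 : (mix_num - added).toNat = 0 := by omega
      rw [aLoop]
      simp [hlt, h0]

-- ===== joint scan lemma =====
-- iter idx k = the scan position k advances after idx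
-- Both loops advance through the same indices; at the first stop (differing text, or the
-- wrap check firing) A collects replicate and B returns the found index (or both give []).
lemma joint_scan (texts : List String) (n_target : Int) (mix_num : Int) (n : Int)
    (hn : n = (texts.length : Int)) (hmix : 2 ≤ mix_num)
    (target : String) (ht : PySem.List.pyGet? texts n_target = some target) :
    ∀ (d : Nat) (idx : Int) (fa fb : Nat) (mixed : List String),
      0 ≤ idx → idx < n →
      d + (mix_num - 1).toNat + 1 ≤ fa → d + 1 ≤ fb →
      (∀ k, k < d → PySem.List.pyGet? texts (PySem.Int.mod (idx + (k : Int)) n) = some target ∧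
        PySem.Int.mod (PySem.Int.mod (idx + (k : Int)) n + 1) n ≠ n_target) →
      (PySem.List.pyGet? texts (PySem.Int.mod (idx + (d : Int)) n) ≠ some target ∨
        PySem.Int.mod (PySem.Int.mod (idx + (d : Int)) n + 1) n = n_target) →
      aLoop texts n_target mix_num n fa idx 1 mixed []
        = (match bFind texts target n_target n fb idx with
           | some j => List.replicate (mix_num - 1).toNat j
           | none => []) := by
  intro d
  induction d with
  | zero =>
    intro idx fa fb mixed h0 hlt hfa hfb _ hstop
    have hpos : (0:Int) < n := lt_of_le_of_lt h0 hlt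
    have hmod : PySem.Int.mod (idx + (0:Nat)) n = idx := by
      rw [PySem.Int.mod_eq_emod_of_pos hpos]
      push_cast
      rw [add_zero]
      exact Int.emod_eq_of_lt h0 hlt
    rw [hmod] at hstop
    obtain ⟨fa', rfl⟩ : ∃ fa', fa = fa' + 1 := ⟨fa - 1, by omega⟩
    obtain ⟨fb', rfl⟩ : ∃ fb', fb = fb' + 1 := ⟨fb - 1, by omega⟩
    -- idx is a valid index, so pyGet? is some
    have hin : PySem.Raise.InRange texts.length idx := by
      constructor <;> omega
    obtain ⟨b, hb⟩ : ∃ b, PySem.List.pyGet? texts idx = some b := by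
      rcases h : PySem.List.pyGet? texts idx with _ | b
      · exact absurd ((PySem.List.pyGet?_eq_none_iff texts idx).mp h) (by simpa using hin)
      · exact ⟨b, rfl⟩
    by_cases hbt : b = target
    · -- current text equals target: the stop must be the wrap check; both bail with []
      have hwrap : PySem.Int.mod (idx + 1) n = n_target := by
        rcases hstop with hdiff | hwrap
        · exact absurd (hbt ▸ hb) hdiff
        · exact hwrap
      rw [aLoop, bFind]
      simp [hb, hbt, hwrap, ht, show (1:Int) < mix_num by omega]
    · -- differing text found here: A collects, B returns idx
      have hne : target ≠ b := fun h => hbt h.symm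
      rw [aLoop_collect texts n_target mix_num n target b idx ht hb hne _ 1 mixed []
        (by omega)]
      rw [bFind]
      simp [hb, hbt]
  | succ d ih =>
    intro idx fa fb mixed h0 hlt hfa hfb hbefore hstop
    have hpos : (0:Int) < n := lt_of_le_of_lt h0 hlt
    have hmod0 : PySem.Int.mod (idx + (0:Nat)) n = idx := by
      rw [PySem.Int.mod_eq_emod_of_pos hpos]
      push_cast
      rw [add_zero]
      exact Int.emod_eq_of_lt h0 hlt
    have h00 := hbefore 0 (Nat.succ_pos d)
    rw [hmod0] at h00
    obtain ⟨heq, hnw⟩ := h00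
    obtain ⟨fa', rfl⟩ : ∃ fa', fa = fa' + 1 := ⟨fa - 1, by omega⟩
    obtain ⟨fb', rfl⟩ : ∃ fb', fb = fb' + 1 := ⟨fb - 1, by omega⟩
    set idx' := PySem.Int.mod (idx + 1) n with hidx'
    have hsh : ∀ (k : Nat), PySem.Int.mod (idx' + (k : Int)) n = PySem.Int.mod (idx + ((k+1 : Nat) : Int)) n := by
      intro k
      rw [hidx', PySem.Int.mod_eq_emod_of_pos hpos, PySem.Int.mod_eq_emod_of_pos hpos,
        PySem.Int.mod_eq_emod_of_pos hpos, Int.emod_add_emod]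
      push_cast
      ring_nf
    have h0' : 0 ≤ idx' := by
      rw [hidx', PySem.Int.mod_eq_emod_of_pos hpos]
      exact Int.emod_nonneg _ (by omega)
    have hlt' : idx' < n := by
      rw [hidx', PySem.Int.mod_eq_emod_of_pos hpos]
      exact Int.emod_lt_of_pos _ hpos
    rw [aLoop, bFind]
    simp only [show (1:Int) < mix_num by omega, if_pos, ht, heq]
    rw [← hidx']
    simp only [if_neg hnw]
    exact ih idx' fa' fb' mixed h0' hlt' (by omega) (by omega)
      (fun k hk => by rw [hsh k]; exact hbefore (k+1) (by omega))
      (by rw [hsh d]; exact hstop)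

-- A's loop exits immediately when mix_num <= 1 (added starts at 1).
lemma aLoop_stop (texts : List String) (n_target mix_num n : Int) (fuel : Nat)
    (idx added : Int) (mixed : List String) (acc : List Int) (h : ¬ added < mix_num) :
    aLoop texts n_target mix_num n fuel idx added mixed acc = acc := by
  cases fuel <;> simp [aLoop, h]

-- ===== VERDICT (by name: the statement is the Claim_ definition above) =====
theorem get_noise_track_idxs_spec : Claim_equal_get_noise_track_idxs := by
  intro texts n_target mix_num _ hpre
  obtain ⟨hne, hcase⟩ := hpre
  unfold Spec_get_noise_track_idxs
  have hlen : 0 < texts.length := List.length_pos_iff.mpr hne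
  have hn0 : ¬ ((texts.length : Int) = 0) := by omega
  simp only [get_noise_track_idxs, get_noise_track_idxs_alt, if_neg hn0]
  by_cases hm : mix_num ≤ 1
  · rw [if_pos hm]
    exact aLoop_stop _ _ _ _ _ _ _ _ _ (by omega)
  · rw [if_neg hm]
    rcases hcase with h1 | ⟨hlb, hub, t, htmem, htne⟩
    · omega
    have hin : PySem.Raise.InRange texts.length n_target := ⟨hlb, hub⟩
    obtain ⟨target, ht⟩ : ∃ b, PySem.List.pyGet? texts n_target = some b := by
      rcases h : PySem.List.pyGet? texts n_target with _ | b
      · exact absurd ((PySem.List.pyGet?_eq_none_iff texts n_target).mp h) (by simpa using hin)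
      · exact ⟨b, rfl⟩
    simp only [ht]
    have hpos : (0:Int) < (texts.length : Int) := by omega
    have htt : t ≠ target := by
      have hgd : PySem.List.pyGetD texts n_target "" = target := by
        simp [PySem.List.pyGetD, ht]
      rw [hgd] at htne
      exact htne
    obtain ⟨m, hmlt, hmget⟩ : ∃ m : Nat, m < texts.length ∧ PySem.List.pyGet? texts (m : Int) = some t := by
      obtain ⟨m, hm', he⟩ := List.mem_iff_getElem.mp htmem
      exact ⟨m, hm', by simp [PySem.List.pyGet?_natCast, List.getElem?_eq_getElem hm', he]⟩
    set idx0 := PySem.Int.mod (n_target + 1) (texts.length : Int) with hidx0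
    have h00 : 0 ≤ idx0 := by
      rw [hidx0, PySem.Int.mod_eq_emod_of_pos hpos]
      exact Int.emod_nonneg _ (by omega)
    have h0lt : idx0 < (texts.length : Int) := by
      rw [hidx0, PySem.Int.mod_eq_emod_of_pos hpos]
      exact Int.emod_lt_of_pos _ hpos
    have hke0 : 0 ≤ ((m : Int) - idx0) % (texts.length : Int) := Int.emod_nonneg _ (by omega)
    have hkelt : ((m : Int) - idx0) % (texts.length : Int) < (texts.length : Int) :=
      Int.emod_lt_of_pos _ hpos
    set kk : Nat := (((m : Int) - idx0) % (texts.length : Int)).toNat with hkk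
    have hk1 : ((kk : Int)) = ((m : Int) - idx0) % (texts.length : Int) := by
      rw [hkk]
      exact Int.toNat_of_nonneg hke0
    have hklt : kk < texts.length := by omega
    have hiterk : PySem.Int.mod (idx0 + (kk : Int)) (texts.length : Int) = (m : Int) := by
      rw [PySem.Int.mod_eq_emod_of_pos hpos, hk1, Int.add_emod_emod,
        show idx0 + ((m : Int) - idx0) = (m : Int) by ring]
      exact Int.emod_eq_of_lt (by omega) (by omega)
    have hpk : (fun k : Nat =>
        PySem.List.pyGet? texts (PySem.Int.mod (idx0 + (k : Int)) (texts.length : Int)) ≠ some target ∨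
        PySem.Int.mod (PySem.Int.mod (idx0 + (k : Int)) (texts.length : Int) + 1) (texts.length : Int) = n_target) kk := by
      refine Or.inl ?_
      rw [hiterk, hmget]
      simp [htt]
    have hex : ∃ k : Nat,
        PySem.List.pyGet? texts (PySem.Int.mod (idx0 + (k : Int)) (texts.length : Int)) ≠ some target ∨
        PySem.Int.mod (PySem.Int.mod (idx0 + (k : Int)) (texts.length : Int) + 1) (texts.length : Int) = n_target :=
      ⟨kk, hpk⟩
    have hd := Nat.find_spec hex
    have hdle : Nat.find hex ≤ kk := Nat.find_le hpk
    refine joint_scan texts n_target mix_num (texts.length : Int) rfl (by omega) target ht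
      (Nat.find hex) idx0 _ _ [] h00 h0lt (by omega) (by omega) ?_ hd
    intro k hk
    have hns := Nat.find_min hex hk
    push Not at hns
    exact hns
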